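-- pv_equiv track=rewrite | github.com/Jongminfire/Baekjoon | Python/11444 (피보나치 수 6, 분할정복).py | squared
-- ===== SOURCE A (Python) =====
-- def multi(m1, m2):
--     ans = []
--     for i in range(len(m1)):
--         lst = []
--         for j in range(len(m2[0])):
--             temp = 0
--             for k in range(len(m1[0])):
--                 temp += m1[i][k] * m2[k][j]
--             lst.append(temp % 1000000007)
--         ans.append(lst)
--
--     return ans
--
-- def squared(matrix, p):
--     if p == 1:
--         return matrix
--
--     div = squared(matrix, p//2)
--     squared_div = multi(div, div)
--
--     # p가 짝수면 div^2 반환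
--     if p % 2 == 0:
--         return squared_div
--     # p가 홀수면 div^3 반환
--     else:
--         return multi(squared_div, matrix)
-- ===== SOURCE B (Python) =====
-- def multi(m1, m2):
--     ans = []
--     for i in range(len(m1)):
--         lst = []
--         for j in range(len(m2[0])):
--             temp = 0
--             for k in range(len(m1[0])):
--                 temp += m1[i][k] * m2[k][j]
--             lst.append(temp % 1000000007)
--         ans.append(lst)
--
--     return ans
--
-- def squared(matrix, p):
--     # bottom-up binary exponentiation: scan the bits of p from the low end,
--     # squaring `base` and multiplying it in whenever the current bit is set
--     base = matrix
--     result = None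
--     while True:
--         if p & 1:
--             result = base if result is None else multi(result, base)
--         p >>= 1
--         if p == 0:
--             break
--         base = multi(base, base)
--     return result
-- ===== Notes on version B (the rewrite author's own statement) =====
-- stated objective: alternative
-- what changed: Replaced the top-down recursive halving of the exponent by a flat bottom-up exponentiation-by-squaring loop over the bits of p, accumulating the product from the first set bit (no identity matrix, no recursion); multi is kept.
import Mathlib
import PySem

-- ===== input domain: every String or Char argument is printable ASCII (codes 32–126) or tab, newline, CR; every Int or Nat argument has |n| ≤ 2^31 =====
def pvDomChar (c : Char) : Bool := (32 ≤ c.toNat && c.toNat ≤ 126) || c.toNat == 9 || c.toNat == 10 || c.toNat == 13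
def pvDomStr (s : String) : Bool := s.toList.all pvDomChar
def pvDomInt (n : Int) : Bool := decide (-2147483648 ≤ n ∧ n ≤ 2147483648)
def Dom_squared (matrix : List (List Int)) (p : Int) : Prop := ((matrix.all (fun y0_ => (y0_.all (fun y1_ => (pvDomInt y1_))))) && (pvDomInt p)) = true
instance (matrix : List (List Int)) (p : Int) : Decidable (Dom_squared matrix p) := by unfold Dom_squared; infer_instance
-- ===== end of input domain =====

-- B replaces A's top-down recursive halving of p by a flat bottom-up exponentiation-by-squaring
-- loop over the bits of p, accumulating from the first set bit; same helper `multi`, same results.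

-- ===== PORT A =====
-- literal port of `multi` (shared helper); in-range indexing m[i][k] is ported with getD,
-- exact on every input Pre_ admits (Python indices are then always in range)
def multi (m1 m2 : List (List Int)) : List (List Int) :=
  (List.range m1.length).foldl (fun ans i =>
    ans ++ [((List.range (m2.getD 0 []).length).foldl (fun lst j =>
      lst ++ [PySem.Int.mod ((List.range (m1.getD 0 []).length).foldl (fun temp k =>
        temp + (m1.getD i []).getD k 0 * (m2.getD k []).getD j 0) 0) 1000000007]) [])]) []

-- the `p ≤ 1` guard makes the recursion total: for p ≤ 0 Python recurses forever (outside Pre_)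
def squared (matrix : List (List Int)) (p : Int) : List (List Int) :=
  if _h : p ≤ 1 then matrix
  else
    let div := squared matrix (PySem.Int.floordiv p 2)
    let squared_div := multi div div
    if PySem.Int.mod p 2 = 0 then squared_div
    else multi squared_div matrix
termination_by p.toNat
decreasing_by
  rw [PySem.Int.floordiv_eq_ediv_of_pos (by norm_num)]
  omega

-- ===== PORT B =====
-- the `p ≤ 0` guard makes the loop total: for p ≤ 0 Python returns None / loops forever (outside Pre_)
def sqLoop (base : List (List Int)) (result : Option (List (List Int))) (p : Int) : List (List Int) :=
  if _h : p ≤ 0 then result.getD []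
  else
    let result' := if PySem.Int.mod p 2 = 1 then
        some (match result with | none => base | some r => multi r base)
      else result
    let p' := PySem.Int.floordiv p 2
    if p' = 0 then result'.getD []
    else sqLoop (multi base base) result' p'
termination_by p.toNat
decreasing_by
  rw [PySem.Int.floordiv_eq_ediv_of_pos (by norm_num)]
  omega

def squared_alt (matrix : List (List Int)) (p : Int) : List (List Int) :=
  sqLoop matrix none p

-- ===== PRECONDITION & SPEC =====
-- Pre_ is exactly where A returns: for p ≤ 0 A recurses forever (RecursionError), and for p ≥ 2
-- it raises IndexError unless len(matrix[0]) ≤ len(matrix) and every row has at least len(matrix[0]) entries.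
def Pre_squared (matrix : List (List Int)) (p : Int) : Prop :=
  1 ≤ p ∧ (p = 1 ∨ ((matrix.getD 0 []).length ≤ matrix.length ∧
    ∀ r ∈ matrix, (matrix.getD 0 []).length ≤ r.length))
instance (matrix : List (List Int)) (p : Int) : Decidable (Pre_squared matrix p) := by
  unfold Pre_squared; infer_instance

def pvWitness_squared : List (List Int) × Int := ([[1, 1], [1, 0]], 11)

def Spec_squared (matrix : List (List Int)) (p : Int) (out : List (List Int)) : Prop := out = squared_alt matrix p
instance (matrix : List (List Int)) (p : Int) (out : List (List Int)) : Decidable (Spec_squared matrix p out) := by unfold Spec_squared; infer_instance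

-- ===== CLAIM (what is proved, stated in full; the proofs are below) =====
def Claim_equal_squared : Prop := ∀ (matrix : List (List Int)) (p : Int), Dom_squared matrix p → Pre_squared matrix p → Spec_squared matrix p (squared matrix p)

-- ===== LEMMAS AND PROOFS =====

-- shape predicates and the two semantic maps into ZMod-matrices
def Wf (n m : Nat) (a : List (List Int)) : Prop :=
  a.length = n ∧ (a.getD 0 []).length = m ∧ ∀ r ∈ a, m ≤ r.length

def Uni (n m : Nat) (a : List (List Int)) : Prop :=
  a.length = n ∧ ∀ r ∈ a, r.length = m

def Nrm (a : List (List Int)) : Prop :=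
  ∀ r ∈ a, ∀ v ∈ r, 0 ≤ v ∧ v < 1000000007

def Pmap (n m : Nat) (a : List (List Int)) : Matrix (Fin n) (Fin m) (ZMod 1000000007) :=
  fun i j => (((a.getD i []).getD j 0 : Int) : ZMod 1000000007)

def Tmap (m : Nat) (a : List (List Int)) : Matrix (Fin m) (Fin m) (ZMod 1000000007) :=
  fun i j => (((a.getD i []).getD j 0 : Int) : ZMod 1000000007)

lemma flatten_map_singleton {α β : Type} (f : α → β) :
    ∀ l : List α, (l.map (fun x => [f x])).flatten = l.map f := by
  intro l; induction l with
  | nil => simp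
  | cons x xs ih => simp [ih]

lemma getDMapRange {β : Type} (f : Nat → β) (d : β) {n i : Nat} (h : i < n) :
    ((List.range n).map f).getD i d = f i := by
  rw [List.getD_eq_getElem?_getD, List.getElem?_map, List.getElem?_range h]
  rfl

lemma multi_eq (m1 m2 : List (List Int)) :
    multi m1 m2 = (List.range m1.length).map (fun i =>
      (List.range (m2.getD 0 []).length).map (fun j =>
        PySem.Int.mod (((List.range (m1.getD 0 []).length).map (fun k =>
          (m1.getD i []).getD k 0 * (m2.getD k []).getD j 0)).sum) 1000000007)) := by
  simp [multi, PySem.List.foldl_add]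
  simp [flatten_map_singleton]

lemma length_multi (m1 m2 : List (List Int)) : (multi m1 m2).length = m1.length := by
  simp [multi_eq]

lemma rows_multi (m1 m2 : List (List Int)) :
    ∀ r ∈ multi m1 m2, r.length = (m2.getD 0 []).length := by
  intro r hr
  rw [multi_eq] at hr
  obtain ⟨i, _, rfl⟩ := List.mem_map.mp hr
  simp

lemma entry_multi (m1 m2 : List (List Int)) {i j : Nat}
    (hi : i < m1.length) (hj : j < (m2.getD 0 []).length) :
    ((multi m1 m2).getD i []).getD j 0 =
      PySem.Int.mod (((List.range (m1.getD 0 []).length).map (fun k =>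
        (m1.getD i []).getD k 0 * (m2.getD k []).getD j 0)).sum) 1000000007 := by
  rw [multi_eq, getDMapRange _ _ hi, getDMapRange _ _ hj]

lemma uni_multi {n m : Nat} {a b : List (List Int)} (ha : Wf n m a) (hb : Wf n m b) :
    Uni n m (multi a b) := by
  refine ⟨by rw [length_multi, ha.1], fun r hr => ?_⟩
  rw [rows_multi a b r hr]
  exact hb.2.1

lemma wf_multi {n m : Nat} {a b : List (List Int)} (ha : Wf n m a) (hb : Wf n m b) :
    Wf n m (multi a b) := by
  obtain ⟨hl, hrows⟩ := uni_multi ha hb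
  refine ⟨hl, ?_, fun r hr => (hrows r hr).ge⟩
  cases hab : multi a b with
  | nil =>
    have hn0 : n = 0 := by rw [← hl, hab]; rfl
    have ha0 : a = [] := List.length_eq_zero_iff.mp (by rw [ha.1, hn0])
    have hm0 := ha.2.1
    rw [ha0] at hm0
    simp at hm0
    simp [← hm0]
  | cons r0 rs =>
    simpa using hrows r0 (by rw [hab]; exact List.mem_cons_self)

lemma nrm_multi (a b : List (List Int)) : Nrm (multi a b) := by
  intro r hr v hv
  rw [multi_eq] at hr
  obtain ⟨i, _, rfl⟩ := List.mem_map.mp hr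
  obtain ⟨j, _, rfl⟩ := List.mem_map.mp hv
  rw [PySem.Int.mod_eq_emod_of_pos (by norm_num)]
  exact ⟨Int.emod_nonneg _ (by norm_num), Int.emod_lt_of_pos _ (by norm_num)⟩

lemma cast_pysem_mod (x : Int) :
    ((PySem.Int.mod x 1000000007 : Int) : ZMod 1000000007) = (x : ZMod 1000000007) := by
  rw [PySem.Int.mod_eq_emod_of_pos (by norm_num)]
  exact_mod_cast ZMod.intCast_mod x 1000000007

lemma listsum_cast (g : Nat → Int) (m : Nat) :
    ((((List.range m).map g).sum : Int) : ZMod 1000000007) =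
      ∑ k ∈ Finset.range m, ((g k : Int) : ZMod 1000000007) := by
  induction m with
  | zero => simp
  | succ t ih =>
    rw [List.range_succ, Finset.sum_range_succ, ← ih, List.map_append, List.sum_append]
    push_cast
    simp

lemma pmap_multi {n m : Nat} (_hm : m ≤ n) {a b : List (List Int)}
    (ha : Wf n m a) (hb : Wf n m b) :
    Pmap n m (multi a b) = Pmap n m a * Tmap m b := by
  funext i j
  have hi : (i : Nat) < a.length := by rw [ha.1]; exact i.isLt
  have hj : (j : Nat) < (b.getD 0 []).length := by rw [hb.2.1]; exact j.isLt
  rw [Matrix.mul_apply]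
  show (((((multi a b).getD i []).getD j 0 : Int)) : ZMod 1000000007) = _
  rw [entry_multi a b hi hj, cast_pysem_mod, listsum_cast, ha.2.1]
  push_cast
  rw [← Fin.sum_univ_eq_sum_range (fun k =>
    (((a.getD (i : Nat) []).getD k 0 : Int) : ZMod 1000000007) *
      (((b.getD k []).getD (j : Nat) 0 : Int) : ZMod 1000000007)) m]
  simp [Pmap, Tmap]

lemma tmap_multi {n m : Nat} (hm : m ≤ n) {a b : List (List Int)}
    (ha : Wf n m a) (hb : Wf n m b) :
    Tmap m (multi a b) = Tmap m a * Tmap m b := by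
  funext i j
  have hi : (i : Nat) < a.length := by rw [ha.1]; exact lt_of_lt_of_le i.isLt hm
  have hj : (j : Nat) < (b.getD 0 []).length := by rw [hb.2.1]; exact j.isLt
  rw [Matrix.mul_apply]
  show (((((multi a b).getD i []).getD j 0 : Int)) : ZMod 1000000007) = _
  rw [entry_multi a b hi hj, cast_pysem_mod, listsum_cast, ha.2.1]
  push_cast
  rw [← Fin.sum_univ_eq_sum_range (fun k =>
    (((a.getD (i : Nat) []).getD k 0 : Int) : ZMod 1000000007) *
      (((b.getD k []).getD (j : Nat) 0 : Int) : ZMod 1000000007)) m]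
  simp [Tmap]

lemma uni_inj {n m : Nat} {a b : List (List Int)} (ha : Uni n m a) (hb : Uni n m b)
    (na : Nrm a) (nb : Nrm b) (h : Pmap n m a = Pmap n m b) : a = b := by
  apply List.ext_getElem (by rw [ha.1, hb.1])
  intro i h1 h2
  apply List.ext_getElem (by rw [ha.2 _ (List.getElem_mem h1), hb.2 _ (List.getElem_mem h2)])
  intro j hj1 hj2
  have hin : i < n := by rw [← ha.1]; exact h1
  have hjm : j < m := by rw [← ha.2 _ (List.getElem_mem h1)]; exact hj1
  have hcast := congrFun (congrFun h ⟨i, hin⟩) ⟨j, hjm⟩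
  simp only [Pmap] at hcast
  rw [List.getD_eq_getElem a [] h1, List.getD_eq_getElem b [] h2,
    List.getD_eq_getElem _ 0 hj1, List.getD_eq_getElem _ 0 hj2] at hcast
  have hba := na _ (List.getElem_mem h1) _ (List.getElem_mem hj1)
  have hbb := nb _ (List.getElem_mem h2) _ (List.getElem_mem hj2)
  have hmod := (ZMod.intCast_eq_intCast_iff _ _ _).mp hcast
  simp only [Int.ModEq] at hmod
  push_cast at hmod
  omega

lemma squared_aux {n m : Nat} (hm : m ≤ n) (M : List (List Int)) (hW : Wf n m M) :
    ∀ N : Nat, ∀ p : Int, p.toNat ≤ N → 1 ≤ p →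
      Wf n m (squared M p) ∧
      Pmap n m (squared M p) = Pmap n m M * Tmap m M ^ (p.toNat - 1) ∧
      Tmap m (squared M p) = Tmap m M ^ p.toNat ∧
      (2 ≤ p → Uni n m (squared M p) ∧ Nrm (squared M p)) := by
  intro N
  induction N with
  | zero => intro p hpN hp1; exfalso; omega
  | succ N ih =>
    intro p hpN hp1
    by_cases hp : p ≤ 1
    · have hp1' : p = 1 := le_antisymm hp hp1
      subst hp1'
      rw [squared, dif_pos (le_refl (1 : Int))]
      refine ⟨hW, by simp, by simp, by omega⟩
    · have h2 : 2 ≤ p := by omega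
      have hfd : PySem.Int.floordiv p 2 = p / 2 :=
        PySem.Int.floordiv_eq_ediv_of_pos (by norm_num)
      have hmd : PySem.Int.mod p 2 = p % 2 :=
        PySem.Int.mod_eq_emod_of_pos (by norm_num)
      have hq1 : 1 ≤ p / 2 := by omega
      have hqN : (p / 2).toNat ≤ N := by omega
      obtain ⟨ihW, ihP, ihT, _⟩ := ih (p / 2) hqN hq1
      rw [squared, dif_neg hp, hfd, hmd]
      by_cases hpar : p % 2 = 0
      · rw [if_pos hpar]
        refine ⟨wf_multi ihW ihW, ?_, ?_, fun _ => ⟨uni_multi ihW ihW, nrm_multi _ _⟩⟩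
        · rw [pmap_multi hm ihW ihW, ihP, ihT, Matrix.mul_assoc, ← pow_add]
          congr 2
          omega
        · rw [tmap_multi hm ihW ihW, ihT, ← pow_add]
          congr 1
          omega
      · rw [if_neg hpar]
        have hWsd := wf_multi ihW ihW
        refine ⟨wf_multi hWsd hW, ?_, ?_, fun _ => ⟨uni_multi hWsd hW, nrm_multi _ _⟩⟩
        · rw [pmap_multi hm hWsd hW, pmap_multi hm ihW ihW, ihP, ihT,
            Matrix.mul_assoc, ← pow_succ, Matrix.mul_assoc, ← pow_add]
          congr 2
          omega
        · rw [tmap_multi hm hWsd hW, tmap_multi hm ihW ihW, ihT, ← pow_add, ← pow_succ]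
          congr 1
          omega

lemma sqLoop_aux {n m : Nat} (hm : m ≤ n) :
    ∀ N : Nat, ∀ p : Int, ∀ base : List (List Int), ∀ result : Option (List (List Int)),
      p.toNat ≤ N → 1 ≤ p → Wf n m base → (∀ r, result = some r → Wf n m r) →
      Wf n m (sqLoop base result p) ∧
      Pmap n m (sqLoop base result p) =
        (match result with
          | none => Pmap n m base * Tmap m base ^ (p.toNat - 1)
          | some r => Pmap n m r * Tmap m base ^ p.toNat) ∧
      ((p = 1 ∧ result = none → Uni n m base ∧ Nrm base) →
        Uni n m (sqLoop base result p) ∧ Nrm (sqLoop base result p)) := by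
  intro N
  induction N with
  | zero => intro p base result hpN hp1 _ _; exfalso; omega
  | succ N ih =>
    intro p base result hpN hp1 hWb hWr
    have hfd : PySem.Int.floordiv p 2 = p / 2 :=
      PySem.Int.floordiv_eq_ediv_of_pos (by norm_num)
    have hmd : PySem.Int.mod p 2 = p % 2 :=
      PySem.Int.mod_eq_emod_of_pos (by norm_num)
    rw [sqLoop.eq_def, dif_neg (by omega : ¬ p ≤ 0)]
    simp only [hfd, hmd]
    by_cases hq0 : p / 2 = 0
    · have hp1' : p = 1 := by omega
      subst hp1'
      rw [if_pos (by norm_num : (1 : Int) % 2 = 1), if_pos hq0]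
      cases result with
      | none =>
        simp only [Option.getD_some]
        refine ⟨hWb, ?_, fun h => h (by simp)⟩
        show Pmap n m base = Pmap n m base * Tmap m base ^ ((1 : Int).toNat - 1)
        simp
      | some r =>
        simp only [Option.getD_some]
        have hWr' := hWr r rfl
        refine ⟨wf_multi hWr' hWb, ?_, fun _ => ⟨uni_multi hWr' hWb, nrm_multi _ _⟩⟩
        show Pmap n m (multi r base) = Pmap n m r * Tmap m base ^ (1 : Int).toNat
        rw [pmap_multi hm hWr' hWb]
        simp
    · have hq1 : 1 ≤ p / 2 := by omega
      have hqN : (p / 2).toNat ≤ N := by omega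
      have hWbb : Wf n m (multi base base) := wf_multi hWb hWb
      rw [if_neg hq0]
      by_cases hpar : p % 2 = 1
      · rw [if_pos hpar]
        cases result with
        | none =>
          obtain ⟨W, P, C⟩ := ih (p / 2) (multi base base) (some base) hqN hq1 hWbb
            (fun r hr => by cases hr; exact hWb)
          simp only [] at P
          refine ⟨W, ?_, fun _ => C (fun h => ⟨uni_multi hWb hWb, nrm_multi _ _⟩)⟩
          show _ = Pmap n m base * Tmap m base ^ (p.toNat - 1)
          rw [P, tmap_multi hm hWb hWb, ← pow_two, ← pow_mul]
          congr 2
          omega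
        | some r =>
          have hWr' := hWr r rfl
          obtain ⟨W, P, C⟩ := ih (p / 2) (multi base base) (some (multi r base)) hqN hq1 hWbb
            (fun r' hr' => by cases hr'; exact wf_multi hWr' hWb)
          simp only [] at P
          refine ⟨W, ?_, fun _ => C (fun h => ⟨uni_multi hWb hWb, nrm_multi _ _⟩)⟩
          show _ = Pmap n m r * Tmap m base ^ p.toNat
          rw [P, pmap_multi hm hWr' hWb, tmap_multi hm hWb hWb, ← pow_two, ← pow_mul,
            Matrix.mul_assoc, ← pow_succ']
          congr 2
          omega
      · rw [if_neg hpar]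
        cases result with
        | none =>
          obtain ⟨W, P, C⟩ := ih (p / 2) (multi base base) none hqN hq1 hWbb
            (fun r hr => by cases hr)
          simp only [] at P
          refine ⟨W, ?_, fun _ => C (fun h => ⟨uni_multi hWb hWb, nrm_multi _ _⟩)⟩
          show _ = Pmap n m base * Tmap m base ^ (p.toNat - 1)
          rw [P, pmap_multi hm hWb hWb, tmap_multi hm hWb hWb, ← pow_two, ← pow_mul,
            Matrix.mul_assoc, ← pow_succ']
          congr 2
          omega
        | some r =>
          have hWr' := hWr r rfl
          obtain ⟨W, P, C⟩ := ih (p / 2) (multi base base) (some r) hqN hq1 hWbb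
            (fun r' hr' => by cases hr'; exact hWr')
          simp only [] at P
          refine ⟨W, ?_, fun _ => C (fun h => ⟨uni_multi hWb hWb, nrm_multi _ _⟩)⟩
          show _ = Pmap n m r * Tmap m base ^ p.toNat
          rw [P, tmap_multi hm hWb hWb, ← pow_two, ← pow_mul]
          congr 2
          omega

lemma alt_one (matrix : List (List Int)) : squared_alt matrix 1 = matrix := by
  unfold squared_alt
  rw [sqLoop]
  simp

-- ===== VERDICT (by name: the statement is the Claim_ definition above) =====
theorem squared_spec : Claim_equal_squared := by
  intro matrix p _ hpre
  unfold Spec_squared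
  obtain ⟨hp1, hcase⟩ := hpre
  by_cases hp : p = 1
  · subst hp
    rw [alt_one, squared, dif_pos (le_refl (1 : Int))]
  · have h2 : 2 ≤ p := by omega
    rcases hcase with h1 | ⟨hmn, hrows⟩
    · exact absurd h1 hp
    have hW : Wf matrix.length (matrix.getD 0 []).length matrix := ⟨rfl, rfl, hrows⟩
    obtain ⟨_, PA, _, hUN⟩ := squared_aux hmn matrix hW p.toNat p (le_refl _) hp1
    obtain ⟨UA, NA⟩ := hUN h2
    obtain ⟨WB, PB, CB⟩ :=
      sqLoop_aux hmn p.toNat p matrix none (le_refl _) hp1 hW (fun r hr => by cases hr)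
    simp only [] at PB
    obtain ⟨UB, NB⟩ := CB (fun h => absurd h.1 (by omega))
    exact uni_inj UA UB NA NB (by unfold squared_alt; rw [PA, PB])
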